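-- pv_equiv track=rewrite | github.com/jxcrw/enigmata | leetcode/647. Palindromic Substrings/palindromic_substrings_2022-09-28.py | _count_palindromes_about_center
-- ===== SOURCE A (Python) =====
-- def _count_palindromes_about_center(string: str, l: int, r: int) -> int:
--     count = 0
--     while l >= 0 and r < len(string):
--         if string[l] != string[r]: break
--         count += 1
--         l -= 1
--         r += 1
--     return count
-- ===== SOURCE B (Python) =====
-- def _count_palindromes_about_center(string: str, l: int, r: int) -> int:
--     left = string[:l + 1][::-1] if l >= 0 else ''
--     right = string[r:]
--     return next((i for i, (a, b) in enumerate(zip(left, right)) if a != b),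
--                 min(len(left), len(right)))
-- ===== Notes on version B (the rewrite author's own statement) =====
-- stated objective: alternative
-- what changed: B replaces A's index-stepping while loop (two moving indices plus a count accumulator) by materialising the reversed left prefix string[:l+1][::-1] and the right suffix string[r:] and returning the first mismatch index of their zip (the length of their common prefix).
-- outside the precondition, e.g. on _count_palindromes_about_center('aaa', 2, -1): A returns 3, B returns 1; on _count_palindromes_about_center('ab', 2, 0): A raises IndexError, B returns 0
import Mathlib
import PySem

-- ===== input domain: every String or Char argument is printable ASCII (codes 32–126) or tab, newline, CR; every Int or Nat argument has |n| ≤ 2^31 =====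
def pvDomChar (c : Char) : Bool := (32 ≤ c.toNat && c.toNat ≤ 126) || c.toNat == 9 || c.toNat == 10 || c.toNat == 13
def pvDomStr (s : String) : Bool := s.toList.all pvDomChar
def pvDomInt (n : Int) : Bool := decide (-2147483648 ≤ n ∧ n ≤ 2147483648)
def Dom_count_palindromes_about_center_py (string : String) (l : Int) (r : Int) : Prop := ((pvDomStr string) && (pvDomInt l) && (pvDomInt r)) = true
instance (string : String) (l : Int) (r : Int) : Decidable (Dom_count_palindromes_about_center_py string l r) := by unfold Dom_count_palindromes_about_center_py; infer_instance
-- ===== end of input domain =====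

-- B replaces A's index-stepping while loop by slicing out the reversed left prefix and the
-- right suffix and returning the first mismatch index of their zip (alternative decomposition,
-- no speed claim). Return-value equivalence only; neither version mutates its arguments.

-- ===== PORT A =====
-- the while loop of A: count accumulator; 'none' from pyGet? models Python's IndexError
-- (unreachable under Pre_); the returned value there is arbitrary.
def pvALoop (cs : List Char) (l : Int) (r : Int) (count : Int) : Int :=
  if _h : 0 ≤ l ∧ r < (cs.length : Int) then
    match PySem.List.pyGet? cs l, PySem.List.pyGet? cs r with
    | some a, some b => if a != b then count else pvALoop cs (l - 1) (r + 1) (count + 1)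
    | _, _ => count   -- Python raises IndexError here; excluded by Pre_
  else count
termination_by (l + 1).toNat
decreasing_by omega

def count_palindromes_about_center_py (string : String) (l : Int) (r : Int) : Int :=
  pvALoop string.toList l r 0

-- ===== PORT B =====
def pvLeft (cs : List Char) (l : Int) : List Char :=
  if 0 ≤ l then (PySem.List.slice cs none (some (l + 1))).reverse else []   -- string[:l+1][::-1] if l >= 0 else ''

def pvRight (cs : List Char) (r : Int) : List Char :=
  PySem.List.slice cs (some r) none                                         -- string[r:]

def count_palindromes_about_center_py_alt (string : String) (l : Int) (r : Int) : Int :=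
  -- next((i for i, (a, b) in enumerate(zip(left, right)) if a != b), min(len(left), len(right)))
  match ((pvLeft string.toList l).zip (pvRight string.toList r)).findIdx? (fun p => p.1 != p.2) with
  | some i => (i : Int)
  | none => min ((pvLeft string.toList l).length : Int) ((pvRight string.toList r).length : Int)

-- ===== PRECONDITION & SPEC =====
-- Pre_ excludes exactly the calls that enter the loop with l ≥ len(string) or with r < 0:
-- with l ≥ len(string) (or r < -len) A raises IndexError, and for negative r A's count comes
-- from Python's negative-index wraparound — an accidental value on a corner no caller of this
-- center-expansion helper would specify — where B counts the matching prefix of the tail slice.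
def Pre_count_palindromes_about_center_py (string : String) (l : Int) (r : Int) : Prop :=
  ¬ (0 ≤ l ∧ r < (string.toList.length : Int) ∧ ((string.toList.length : Int) ≤ l ∨ r < 0))
instance (string : String) (l : Int) (r : Int) : Decidable (Pre_count_palindromes_about_center_py string l r) := by unfold Pre_count_palindromes_about_center_py; infer_instance

def pvWitness_count_palindromes_about_center_py : String × Int × Int := ("aba", 1, 1)

def Spec_count_palindromes_about_center_py (string : String) (l : Int) (r : Int) (out : Int) : Prop := out = count_palindromes_about_center_py_alt string l r
instance (string : String) (l : Int) (r : Int) (out : Int) : Decidable (Spec_count_palindromes_about_center_py string l r out) := by unfold Spec_count_palindromes_about_center_py; infer_instance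

-- ===== CLAIM (what is proved, stated in full; the proofs are below) =====
def Claim_equal_count_palindromes_about_center_py : Prop := ∀ (string : String) (l : Int) (r : Int), Dom_count_palindromes_about_center_py string l r → Pre_count_palindromes_about_center_py string l r → Spec_count_palindromes_about_center_py string l r (count_palindromes_about_center_py string l r)

-- ===== LEMMAS AND PROOFS =====

-- first-mismatch count of a pair list (proof-side characterisation of B's next(...) expression)
def pvMism : List (Char × Char) → Int
  | [] => 0
  | p :: t => if p.1 != p.2 then 0 else 1 + pvMism t

lemma pvFindIdx_eq_mism (pairs : List (Char × Char)) :
    (match pairs.findIdx? (fun p => p.1 != p.2) with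
     | some i => (i : Int)
     | none => (pairs.length : Int)) = pvMism pairs := by
  induction pairs with
  | nil => simp [pvMism]
  | cons p t ih =>
    rw [List.findIdx?_cons]
    by_cases h : p.1 != p.2
    · rw [if_pos h]
      simp [pvMism, h]
    · rw [if_neg h, pvMism, if_neg h]
      cases ht : t.findIdx? (fun q => q.1 != q.2) with
      | none =>
        rw [ht] at ih
        simp at ih ⊢
        rw [← ih]
        ring
      | some i =>
        rw [ht] at ih
        simp at ih ⊢
        rw [← ih]
        ring

lemma pvALoop_eq_mism (cs : List Char) :
    ∀ (k : Nat) (l r c : Int), l + 1 = (k : Int) → 0 ≤ l → l < (cs.length : Int) → 0 ≤ r →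
      pvALoop cs l r c = c + pvMism ((cs.take (l.toNat + 1)).reverse.zip (cs.drop r.toNat)) := by
  intro k
  induction k with
  | zero => intro l r c hk hl; omega
  | succ k ih =>
    intro l r c hk hl hln hr
    rw [pvALoop]
    by_cases hrn : r < (cs.length : Int)
    · have hlt : l.toNat < cs.length := by omega
      have hrt : r.toNat < cs.length := by omega
      rw [dif_pos ⟨hl, hrn⟩]
      rw [PySem.List.pyGet?_eq_some_getElem cs hl hln,
          PySem.List.pyGet?_eq_some_getElem cs hr hrn]
      have htake : (cs.take (l.toNat + 1)).reverse = cs[l.toNat] :: (cs.take l.toNat).reverse := by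
        rw [List.take_add_one, List.getElem?_eq_getElem hlt]
        simp
      have hdrop : cs.drop r.toNat = cs[r.toNat] :: cs.drop (r.toNat + 1) := by
        rw [List.drop_eq_getElem_cons hrt]
      rw [htake, hdrop, List.zip_cons_cons]
      by_cases hne : cs[l.toNat] != cs[r.toNat]
      · simp [hne, pvMism]
      · simp only [hne, pvMism]
        by_cases hl0 : l = 0
        · subst hl0
          rw [pvALoop]
          rw [dif_neg (by omega)]
          simp [pvMism]
        · have := ih (l - 1) (r + 1) (c + 1) (by omega) (by omega) (by omega) (by omega)
          rw [this]
          have h1 : (l - 1).toNat + 1 = l.toNat := by omega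
          have h2 : (r + 1).toNat = r.toNat + 1 := by omega
          rw [h1, h2]
          simp only [Bool.false_eq_true, if_false]
          omega
    · rw [dif_neg (by omega)]
      have : cs.drop r.toNat = [] := by
        apply List.drop_eq_nil_of_le
        omega
      rw [this]
      simp [pvMism]

theorem count_palindromes_about_center_py_spec : Claim_equal_count_palindromes_about_center_py := by
  intro s l r _hdom hpre
  unfold Spec_count_palindromes_about_center_py
  unfold Pre_count_palindromes_about_center_py at hpre
  unfold count_palindromes_about_center_py count_palindromes_about_center_py_alt pvLeft pvRight
  set cs := s.toList with hcs
  by_cases hl : 0 ≤ l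
  · by_cases hrn : r < (cs.length : Int)
    · -- loop entered: by Pre_, 0 ≤ r and l < len(string)
      have hln : l < (cs.length : Int) := by omega
      have hr : 0 ≤ r := by omega
      have hlt : (l + 1).toNat = l.toNat + 1 := by omega
      rw [if_pos hl, PySem.List.slice_to cs (show (0:Int) ≤ l + 1 by omega),
          PySem.List.slice_from cs hr, hlt]
      rw [pvALoop_eq_mism cs (l + 1).toNat l r 0 (by omega) hl hln hr]
      rw [← pvFindIdx_eq_mism]
      cases hfi : ((cs.take (l.toNat + 1)).reverse.zip (cs.drop r.toNat)).findIdx?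
          (fun p => p.1 != p.2) with
      | some i => simp
      | none =>
        rw [List.length_zip]
        push_cast
        rw [zero_add]
    · -- r ≥ len(string): the loop never runs and the right slice is empty
      rw [pvALoop, dif_neg (by omega), if_pos hl]
      have hemp : PySem.List.slice cs (some r) none = [] := by
        rw [PySem.List.slice_from cs (show (0:Int) ≤ r by omega)]
        apply List.drop_eq_nil_of_le
        omega
      rw [hemp]
      simp
  · -- l < 0: the loop never runs and the left slice is empty
    rw [pvALoop, dif_neg (by omega)]
    simp [hl]
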